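-- pv_equiv track=rewrite | github.com/banboooo044/AtCoder | codefes_qualA/C.py | twocount
-- ===== SOURCE A (Python) =====
-- def twocount(List):
--
-- 	num = 0
-- 	tmp = 1
-- 	l = len(List)
--
-- 	for i in range(1,l):
--
-- 		if (List[i-1] == List[i]) and (tmp < 2):
-- 			tmp += 1
--
-- 		elif tmp == 2:
-- 			num += 1
-- 			tmp = 1
--
-- 		else:
-- 			tmp = 1
--
-- 	if tmp == 2:
-- 		num += 1
--
-- 	return num
-- ===== SOURCE B (Python) =====
-- def twocount(List):
--     total = 0
--     n = len(List)
--     i = 0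
--     while i < n:
--         x = List[i]
--         j = i
--         while j < n and List[j] == x:
--             j += 1
--         total += (j - i) // 2
--         i = j
--     return total
-- ===== Notes on version B (the rewrite author's own statement) =====
-- stated objective: alternative
-- what changed: Replaced the greedy tmp-state machine over adjacent index pairs with run-length grouping: scan each maximal run of equal elements once and sum run_length // 2 over the runs.
import Mathlib
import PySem

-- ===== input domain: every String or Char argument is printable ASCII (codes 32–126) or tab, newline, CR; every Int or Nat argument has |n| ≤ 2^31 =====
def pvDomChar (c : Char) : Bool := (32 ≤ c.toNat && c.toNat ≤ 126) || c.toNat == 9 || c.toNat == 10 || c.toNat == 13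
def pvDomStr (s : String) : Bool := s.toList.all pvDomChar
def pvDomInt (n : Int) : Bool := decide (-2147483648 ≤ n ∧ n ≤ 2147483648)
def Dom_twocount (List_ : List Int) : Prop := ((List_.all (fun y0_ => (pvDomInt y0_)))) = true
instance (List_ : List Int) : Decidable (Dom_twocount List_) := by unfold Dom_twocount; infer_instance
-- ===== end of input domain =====

-- B replaces A's greedy tmp-state machine over adjacent index pairs by run-length grouping
-- (sum of run_length // 2 over maximal runs of equal elements); objective: simpler.

-- ===== PORT A =====
-- for i in range(1, l): greedy state (num, tmp), then a final flush of tmp == 2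
def twocount (List_ : List Int) : Int :=
  let l : Int := List_.length
  let s :=
    (PySem.List.pyRange 1 l 1).foldl
      (fun (s : Int × Int) i =>
        if (PySem.List.pyGetD List_ (i - 1) 0 == PySem.List.pyGetD List_ i 0)
            && decide (s.2 < 2) then (s.1, s.2 + 1)
        else if s.2 == 2 then (s.1 + 1, (1 : Int))
        else (s.1, (1 : Int)))
      ((0 : Int), (1 : Int))
  if s.2 == 2 then s.1 + 1 else s.1

-- ===== PORT B =====
-- inner while: advance j past the maximal run of elements equal to x
def pvScan (L : List Int) (x : Int) (j : Nat) : Nat :=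
  if h : j < L.length then
    if L[j] == x then pvScan L x (j + 1) else j
  else j
termination_by L.length - j

theorem pvScan_ge (L : List Int) (x : Int) (j : Nat) : j ≤ pvScan L x j := by
  generalize hm : L.length - j = m
  induction m generalizing j with
  | zero =>
    rw [pvScan]
    split_ifs <;> omega
  | succ m ih =>
    rw [pvScan]
    split_ifs with h1 h2
    · have := ih (j + 1) (by omega)
      omega
    · exact le_rfl
    · exact le_rfl

-- outer while: i jumps run by run; total += (j - i) // 2 per run
def pvOuter (L : List Int) (i : Nat) (total : Int) : Int :=
  if h : i < L.length then
    pvOuter L (pvScan L L[i] i)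
      (total + (((pvScan L L[i] i - i) / 2 : Nat) : Int))
  else total
termination_by L.length - i
decreasing_by
  have h1 : i + 1 ≤ pvScan L L[i] (i + 1) := pvScan_ge L L[i] (i + 1)
  have h2 : pvScan L L[i] i = pvScan L L[i] (i + 1) := by
    rw [pvScan]
    simp [h]
  omega

def twocount_alt (List_ : List Int) : Int := pvOuter List_ 0 0

-- ===== PRECONDITION & SPEC =====
def Spec_twocount (List_ : List Int) (out : Int) : Prop := out = twocount_alt List_
instance (List_ : List Int) (out : Int) : Decidable (Spec_twocount List_ out) := by unfold Spec_twocount; infer_instance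

-- ===== CLAIM (what is proved, stated in full; the proofs are below) =====
def Claim_equal_twocount : Prop := ∀ (List_ : List Int), Dom_twocount List_ → Spec_twocount List_ (twocount List_)

-- ===== LEMMAS AND PROOFS =====
-- ============ proof-layer model of B: run grouping as list recursion ============

-- consume the leading run of elements equal to x: (number consumed, remaining suffix)
def pvRun (x : Int) : List Int → Nat × List Int
  | [] => (0, [])
  | y :: ys => if y == x then ((pvRun x ys).1 + 1, (pvRun x ys).2) else (0, y :: ys)

theorem pvRun_snd_length_le (x : Int) (ys : List Int) :
    (pvRun x ys).2.length ≤ ys.length := by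
  induction ys with
  | nil => simp [pvRun]
  | cons y ys ih =>
    by_cases h : y == x
    · simp [pvRun, h]; omega
    · simp [pvRun, h]

def twocountGo : List Int → Int
  | [] => 0
  | x :: xs =>
    ((((pvRun x xs).1 + 1) / 2 : Nat) : Int) + twocountGo (pvRun x xs).2
termination_by l => l.length
decreasing_by
  have := pvRun_snd_length_le x xs
  simp; omega

theorem pvRun_snd_eq_drop (x : Int) (ys : List Int) :
    (pvRun x ys).2 = ys.drop (pvRun x ys).1 := by
  induction ys with
  | nil => simp [pvRun]
  | cons y ys ih =>
    by_cases h : y == x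
    · simp [pvRun, h, ih]
    · simp [pvRun, h]

-- pvScan advances exactly by the pvRun count of the dropped suffix
theorem pvScan_eq_run (L : List Int) (x : Int) (j : Nat) :
    pvScan L x j = j + (pvRun x (L.drop j)).1 := by
  generalize hm : L.length - j = m
  induction m generalizing j with
  | zero =>
    have hj : L.length ≤ j := by omega
    rw [pvScan]
    simp [List.drop_eq_nil_of_le hj, pvRun, Nat.not_lt.mpr hj]
  | succ m ih =>
    have hj : j < L.length := by omega
    have hdrop : L.drop j = L[j] :: L.drop (j + 1) := (List.getElem_cons_drop hj).symm
    rw [pvScan]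
    by_cases hx : L[j] == x
    · rw [dif_pos hj, if_pos hx, ih (j + 1) (by omega), hdrop]
      simp [pvRun, hx]
      omega
    · rw [dif_pos hj, if_neg hx, hdrop]
      simp [pvRun, hx]

-- pvOuter computes the run recursion on the dropped suffix
theorem pvOuter_eq_aux (L : List Int) : ∀ (m i : Nat) (total : Int), L.length - i ≤ m →
    pvOuter L i total = total + twocountGo (L.drop i) := by
  intro m
  induction m with
  | zero =>
    intro i total hm
    have hi : L.length ≤ i := by omega
    rw [pvOuter, dif_neg (by omega)]
    have hg : twocountGo ([] : List Int) = 0 := by rw [twocountGo]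
    simp [List.drop_eq_nil_of_le hi, hg]
  | succ m ih =>
    intro i total hm
    by_cases hi : i < L.length
    · have hdrop : L.drop i = L[i] :: L.drop (i + 1) := (List.getElem_cons_drop hi).symm
      have hscan : pvScan L L[i] i = i + 1 + (pvRun L[i] (L.drop (i + 1))).1 := by
        rw [pvScan_eq_run, hdrop]
        simp [pvRun]
        omega
      have hgo : twocountGo (L.drop i)
          = ((((pvRun L[i] (L.drop (i + 1))).1 + 1) / 2 : Nat) : Int)
            + twocountGo (pvRun L[i] (L.drop (i + 1))).2 := by
        rw [hdrop, twocountGo]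
      rw [pvOuter, dif_pos hi]
      rw [ih (pvScan L L[i] i) _ (by rw [hscan]; omega)]
      have hrest : L.drop (pvScan L L[i] i) = (pvRun L[i] (L.drop (i + 1))).2 := by
        rw [hscan, pvRun_snd_eq_drop, List.drop_drop]
      rw [hrest, hgo]
      have harith : pvScan L L[i] i - i = (pvRun L[i] (L.drop (i + 1))).1 + 1 := by
        rw [hscan]; omega
      rw [harith]
      ring
    · rw [pvOuter, dif_neg hi]
      have hg : twocountGo ([] : List Int) = 0 := by rw [twocountGo]
      simp [List.drop_eq_nil_of_le (by omega : L.length ≤ i), hg]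

theorem pvOuter_eq (L : List Int) (i : Nat) (total : Int) :
    pvOuter L i total = total + twocountGo (L.drop i) :=
  pvOuter_eq_aux L L.length i total (by omega)

-- A's loop step on the adjacent pair (a, b)
def pvStep (s : Int × Int) (a b : Int) : Int × Int :=
  if (a == b) && decide (s.2 < 2) then (s.1, s.2 + 1)
  else if s.2 == 2 then (s.1 + 1, (1 : Int))
  else (s.1, (1 : Int))

-- A's loop as structural recursion over adjacent pairs
def pvPairs : (Int × Int) → List Int → (Int × Int)
  | s, a :: b :: t => pvPairs (pvStep s a b) (b :: t)
  | s, _ => s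

-- A's final flush
def pvFin (s : Int × Int) : Int := if s.2 == 2 then s.1 + 1 else s.1

theorem pvGetD_cons_succ (a : Int) (L : List Int) (k : Int) (hk : 0 ≤ k) :
    PySem.List.pyGetD (a :: L) (k + 1) 0 = PySem.List.pyGetD L k 0 := by
  rw [PySem.List.pyGetD_of_nonneg _ _ (by omega), PySem.List.pyGetD_of_nonneg _ _ hk]
  have : (k + 1).toNat = k.toNat + 1 := by omega
  simp [this]

-- A's range-indexed fold is the pair fold
theorem pvFold_eq_pairs (L : List Int) (s : Int × Int) :
    (PySem.List.pyRange 1 (L.length : Int) 1).foldl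
      (fun s i => pvStep s (PySem.List.pyGetD L (i - 1) 0) (PySem.List.pyGetD L i 0)) s
    = pvPairs s L := by
  induction L generalizing s with
  | nil => simp [PySem.List.pyRange_one_eq_nil, pvPairs]
  | cons a L ih =>
    cases L with
    | nil =>
      simp [PySem.List.pyRange_one_eq_nil, pvPairs]
    | cons b t =>
      have h1 : (1 : Int) < ((a :: b :: t).length : Int) := by simp
      rw [PySem.List.pyRange_one_cons h1]
      have h2 : PySem.List.pyRange (1 + 1) ((a :: b :: t).length : Int) 1
          = (PySem.List.pyRange 1 ((b :: t).length : Int) 1).map (· + 1) := by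
        rw [PySem.List.pyRange_one, PySem.List.pyRange_one]
        have : (((a :: b :: t).length : Int) - (1 + 1)).toNat
            = (((b :: t).length : Int) - 1).toNat := by simp; omega
        rw [this, List.map_map]
        apply List.map_congr_left
        intro k _
        simp; omega
      simp only [List.foldl_cons, h2, List.foldl_map]
      have hstep : pvStep s (PySem.List.pyGetD (a :: b :: t) (1 - 1) 0)
          (PySem.List.pyGetD (a :: b :: t) 1 0) = pvStep s a b := by
        norm_num [PySem.List.pyGetD_of_nonneg]
      rw [hstep]
      have hcong :
          (PySem.List.pyRange 1 ((b :: t).length : Int) 1).foldl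
            (fun s i => pvStep s (PySem.List.pyGetD (a :: b :: t) (i + 1 - 1) 0)
              (PySem.List.pyGetD (a :: b :: t) (i + 1) 0)) (pvStep s a b)
          = (PySem.List.pyRange 1 ((b :: t).length : Int) 1).foldl
            (fun s i => pvStep s (PySem.List.pyGetD (b :: t) (i - 1) 0)
              (PySem.List.pyGetD (b :: t) i 0)) (pvStep s a b) := by
        apply PySem.List.foldl_congr_mem
        intro acc i hi
        rw [PySem.List.mem_pyRange_one] at hi
        have e1 : i + 1 - 1 = (i - 1) + 1 := by ring
        rw [e1, pvGetD_cons_succ _ _ _ (by omega), pvGetD_cons_succ _ _ _ (by omega)]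
      rw [hcong, ih]
      rfl

-- pvRun decomposes the list into a maximal run plus a suffix not starting with x
theorem pvRun_spec (x : Int) (ys : List Int) :
    ys = List.replicate (pvRun x ys).1 x ++ (pvRun x ys).2 ∧
      (∀ z t, (pvRun x ys).2 = z :: t → z ≠ x) := by
  induction ys with
  | nil => simp [pvRun]
  | cons y ys ih =>
    by_cases h : y = x
    · subst h
      simp only [pvRun, beq_self_eq_true, if_pos]
      refine ⟨?_, ih.2⟩
      simp [List.replicate_succ]
      exact ih.1
    · have hb : (y == x) = false := by simp [h]
      simp [pvRun, hb]
      exact h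

-- consuming r equal pairs from tmp = 1: num gains r / 2, tmp becomes 1 or 2 by parity
theorem pvPairs_run (r : Nat) (x : Int) (rest : List Int) (num : Int) :
    pvPairs (num, 1) (x :: (List.replicate r x ++ rest))
      = pvPairs (num + ((r / 2 : Nat) : Int), if r % 2 = 0 then 1 else 2)
          (x :: rest) := by
  induction r using Nat.strong_induction_on generalizing num with
  | _ r ih =>
    match r with
    | 0 => simp
    | 1 =>
      simp only [List.replicate_succ, List.replicate_zero, List.cons_append,
        List.nil_append, pvPairs, pvStep]
      norm_num
    | (n + 2) =>
      have e1 : x :: (List.replicate (n + 2) x ++ rest)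
          = x :: x :: (x :: (List.replicate n x ++ rest)) := by
        simp [List.replicate_succ]
      rw [e1]
      show pvPairs (pvStep (num, 1) x x) (x :: (x :: (List.replicate n x ++ rest))) = _
      have s1 : pvStep (num, 1) x x = (num, 2) := by simp [pvStep]
      rw [s1]
      show pvPairs (pvStep (num, 2) x x) (x :: (List.replicate n x ++ rest)) = _
      have s2 : pvStep (num, 2) x x = (num + 1, 1) := by simp [pvStep]
      rw [s2, ih n (by omega)]
      have e2 : ((n + 2) / 2 : Nat) = (n / 2 : Nat) + 1 := by omega
      have e3 : (n + 2) % 2 = n % 2 := by omega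
      rw [e2, e3]
      push_cast
      ring_nf

-- the pair fold plus final flush computes B's run recursion
theorem pvPairs_eq_go_aux : ∀ (n : Nat) (L : List Int), L.length ≤ n →
    ∀ num : Int, pvFin (pvPairs (num, 1) L) = num + twocountGo L := by
  intro n
  induction n with
  | zero =>
    intro L hL num
    have h0 : L = [] := by cases L <;> simp_all
    subst h0
    have hg : twocountGo ([] : List Int) = 0 := by rw [twocountGo]
    simp [pvPairs, pvFin, hg]
  | succ n ih =>
    intro L hL num
    cases L with
    | nil =>
      have hg : twocountGo ([] : List Int) = 0 := by rw [twocountGo]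
      simp [pvPairs, pvFin, hg]
    | cons x xs =>
      have hgo : twocountGo (x :: xs) = ((((pvRun x xs).1 + 1) / 2 : Nat) : Int)
          + twocountGo (pvRun x xs).2 := by rw [twocountGo]
      have hlen := pvRun_snd_length_le x xs
      obtain ⟨hdecomp, hhead⟩ := pvRun_spec x xs
      rcases hq : pvRun x xs with ⟨r, rest⟩
      rw [hq] at hgo hlen hdecomp hhead
      simp only at hgo hlen hdecomp hhead
      rw [hgo]
      conv_lhs => rw [hdecomp]
      rw [pvPairs_run]
      cases rest with
      | nil =>
        have hg : twocountGo ([] : List Int) = 0 := by rw [twocountGo]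
        have hp : pvPairs (num + ((r / 2 : Nat) : Int), if r % 2 = 0 then 1 else 2)
            [x] = (num + ((r / 2 : Nat) : Int), if r % 2 = 0 then 1 else 2) := rfl
        rw [hp, hg]
        by_cases hpar : r % 2 = 0
        · simp [pvFin, hpar]; omega
        · simp [pvFin, hpar]; omega
      | cons z t =>
        have hz : z ≠ x := hhead z t rfl
        show pvFin (pvPairs (pvStep _ x z) (z :: t)) = _
        have hstep : pvStep (num + ((r / 2 : Nat) : Int), if r % 2 = 0 then 1 else 2) x z
            = (num + (((r + 1) / 2 : Nat) : Int), 1) := by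
          have hzb : (x == z) = false := by simp; exact fun h => hz h.symm
          unfold pvStep
          by_cases hpar : r % 2 = 0
          · simp [hzb, hpar]; omega
          · simp [hzb, hpar]; omega
        rw [hstep]
        have hlt : (z :: t).length ≤ n := by
          simp at hL hlen ⊢
          rw [hdecomp] at hL
          simp at hL
          omega
        rw [ih (z :: t) hlt]
        ring

theorem pvPairs_eq_go (L : List Int) (num : Int) :
    pvFin (pvPairs (num, 1) L) = num + twocountGo L :=
  pvPairs_eq_go_aux L.length L le_rfl num

-- ===== VERDICT (by name: the statement is the Claim_ definition above) =====
theorem twocount_spec : Claim_equal_twocount := by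
  intro L _
  unfold Spec_twocount twocount twocount_alt
  show pvFin ((PySem.List.pyRange 1 (L.length : Int) 1).foldl
      (fun s i => pvStep s (PySem.List.pyGetD L (i - 1) 0) (PySem.List.pyGetD L i 0))
      (0, 1)) = pvOuter L 0 0
  rw [pvOuter_eq, pvFold_eq_pairs, pvPairs_eq_go]
  simp
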